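-- pv_equiv track=rewrite | github.com/ildvr-git/starting_out_with_python_5 | chapter_9/ex9_4.py | delete_signs
-- ===== SOURCE A (Python) =====
-- def delete_signs(in_set):
--     new_set = set()
--     signs = ",.!?:;*)(][}{/\"\'"
--     for word in in_set:
--         for char in word:
--             if char in signs:
--                 word = word.replace(char, "")
--         new_set.add(word.lower())
--     return new_set
-- ===== SOURCE B (Python) =====
-- def delete_signs(in_set):
--     signs = ",.!?:;*)(][}{/\"\'"
--     return {''.join(c for c in word if c not in signs).lower() for word in in_set}
-- ===== Notes on version B (the rewrite author's own statement) =====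
-- stated objective: simpler
-- what changed: Replaced the nested loop that calls word.replace once per offending character (re-scanning the whole word each time) with a single linear character-filter pass per word, collected by a set comprehension.
import Mathlib
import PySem

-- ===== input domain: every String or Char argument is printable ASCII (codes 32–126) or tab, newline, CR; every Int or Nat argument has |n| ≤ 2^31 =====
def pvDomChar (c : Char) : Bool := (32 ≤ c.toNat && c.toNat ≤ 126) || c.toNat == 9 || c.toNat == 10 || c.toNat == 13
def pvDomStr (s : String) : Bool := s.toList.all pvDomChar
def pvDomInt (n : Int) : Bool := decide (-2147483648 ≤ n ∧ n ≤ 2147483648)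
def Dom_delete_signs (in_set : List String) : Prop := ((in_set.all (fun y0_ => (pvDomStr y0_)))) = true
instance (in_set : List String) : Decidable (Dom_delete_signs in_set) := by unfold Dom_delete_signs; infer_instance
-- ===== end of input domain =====

-- B replaces A's repeated word.replace re-scans by one linear filter pass per word (simpler).
-- ===== PORT A =====
-- the punctuation string `signs`, as a char list
def pvSigns : List Char := ",.!?:;*)(][}{/\"'".toList

def delete_signs (in_set : List String) : List String :=
  in_set.foldl
    (fun new_set word =>
      -- `for char in word:` iterates over the ORIGINAL word; reassignment of `word` does not change it
      let w := word.toList.foldl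
        (fun cur char =>
          if PySem.Chars.isIn [char] pvSigns then PySem.Chars.replace cur [char] [] else cur)
        word.toList
      PySem.Set.add new_set (String.ofList (PySem.Chars.lower w)))
    PySem.Set.empty

-- ===== PORT B =====
def delete_signs_alt (in_set : List String) : List String :=
  in_set.foldl
    (fun acc word =>
      PySem.Set.add acc
        (String.ofList (PySem.Chars.lower
          (word.toList.filter (fun c => !(PySem.Chars.isIn [c] pvSigns))))))
    PySem.Set.empty

-- ===== PRECONDITION & SPEC =====
def Spec_delete_signs (in_set : List String) (out : List String) : Prop := out = delete_signs_alt in_set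
instance (in_set : List String) (out : List String) : Decidable (Spec_delete_signs in_set out) := by unfold Spec_delete_signs; infer_instance

-- ===== CLAIM (what is proved, stated in full; the proofs are below) =====
def Claim_equal_delete_signs : Prop := ∀ (in_set : List String), Dom_delete_signs in_set → Spec_delete_signs in_set (delete_signs in_set)

-- ===== LEMMAS AND PROOFS =====

-- replacing a single-char pattern by "" is exactly filtering that char out
theorem replace_go_single (c : Char) : ∀ (l acc : List Char) (fuel : Nat), l.length ≤ fuel →
    PySem.Chars.replace.go [c] [] fuel l acc = acc.reverse ++ l.filter (· ≠ c) := by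
  intro l
  induction l with
  | nil => intro acc fuel _; cases fuel <;> simp [PySem.Chars.replace.go]
  | cons x t ih =>
    intro acc fuel hf
    cases fuel with
    | zero => simp at hf
    | succ n =>
      simp only [PySem.Chars.replace.go]
      by_cases hx : x = c
      · subst hx
        rw [if_pos (by simp [List.isPrefixOf])]
        simp only [List.length_cons] at hf
        simp only [List.length_cons, List.length_nil, List.drop_succ_cons, List.drop_zero,
          List.reverse_nil, List.nil_append]
        rw [ih acc n (by omega)]
        simp
      · rw [if_neg (by simp [List.isPrefixOf]; intro h; exact (hx h.symm).elim)]
        simp only [List.length_cons] at hf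
        rw [ih (x :: acc) n (by omega)]
        simp [hx]

theorem replace_single (c : Char) (s : List Char) :
    PySem.Chars.replace s [c] [] = s.filter (· ≠ c) := by
  simp only [PySem.Chars.replace, List.isEmpty_cons]
  exact (replace_go_single c s [] s.length le_rfl).trans (by simp)

-- A's inner loop (one replace per offending char of the original word) equals one filter pass,
-- provided every offending char of the current string occurs among the chars still to be visited
theorem inner_loop_eq_filter (bad : Char → Bool) :
    ∀ (cs cur : List Char), (∀ x ∈ cur, bad x → x ∈ cs) →
    cs.foldl (fun cur c => if bad c then cur.filter (· ≠ c) else cur) cur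
      = cur.filter (fun x => !(bad x)) := by
  intro cs
  induction cs with
  | nil =>
    intro cur h
    simp only [List.foldl_nil]
    refine (List.filter_eq_self.mpr fun x hx => ?_).symm
    have hb : ¬ bad x = true := fun hb => by simpa using h x hx hb
    simp [hb]
  | cons c t ih =>
    intro cur h
    simp only [List.foldl_cons]
    by_cases hc : bad c = true
    · rw [if_pos hc, ih _ (fun x hx hb => by
        have hxm := List.mem_filter.mp hx
        have hne : x ≠ c := by simp at hxm; exact hxm.2
        rcases List.mem_cons.mp (h x hxm.1 hb) with he | hm
        · exact absurd he hne
        · exact hm)]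
      rw [List.filter_filter]
      refine List.filter_congr (fun x _ => ?_)
      by_cases hb : bad x = true
      · simp [hb]
      · have : x ≠ c := fun he => by rw [he] at hb; exact hb hc
        simp [hb, this]
    · rw [if_neg hc]
      exact ih cur (fun x hx hb => by
        rcases List.mem_cons.mp (h x hx hb) with rfl | hm
        · exact absurd hb hc
        · exact hm)

theorem cleaned_word_eq (w : List Char) :
    w.foldl (fun cur char =>
        if PySem.Chars.isIn [char] pvSigns then PySem.Chars.replace cur [char] [] else cur) w
      = w.filter (fun c => !(PySem.Chars.isIn [c] pvSigns)) := by
  rw [PySem.List.foldl_congr_mem w _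
        (fun cur char => if PySem.Chars.isIn [char] pvSigns then cur.filter (· ≠ char) else cur) w
        (fun cur c _ => by
          by_cases hb : PySem.Chars.isIn [c] pvSigns <;> simp [hb, replace_single])]
  exact inner_loop_eq_filter (fun c => PySem.Chars.isIn [c] pvSigns) w w (fun x hx _ => hx)

-- ===== VERDICT (by name: the statement is the Claim_ definition above) =====
theorem delete_signs_spec : Claim_equal_delete_signs := by
  intro in_set _
  unfold Spec_delete_signs delete_signs delete_signs_alt
  refine PySem.List.foldl_congr_mem in_set _ _ PySem.Set.empty fun acc word _ => ?_
  simp only [cleaned_word_eq]
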